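-- pv_equiv track=rewrite | github.com/stdstring/stepik-tasks | competition_programming/module1/training67.py | generate
-- ===== SOURCE A (Python) =====
-- import typing
--
-- def generate(n: int, m: int) -> typing.List[str]:
--     current_arrangements = list(map(lambda _: [], range(0, m + 1)))
--     current_arrangements[0] = ["."]
--     current_arrangements[1] = ["*"]
--     for _ in range(1, n):
--         next_arrangements = list(map(lambda _: [], range(0, m + 1)))
--         for chip_count in range(0, m + 1):
--             for row in current_arrangements[chip_count]:
--                 next_arrangements[chip_count].append("." + row)
--                 if (chip_count < m) and (row[0] != "*"):
--                     next_arrangements[chip_count + 1].append("*" + row)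
--         current_arrangements = next_arrangements
--     return current_arrangements[-1]
-- ===== SOURCE B (Python) =====
-- import typing
--
-- def generate(n: int, m: int) -> typing.List[str]:
--     # Depth-first backtracking with feasibility pruning, emitting complete
--     # strings left-to-right in the same order as the DP version.
--     length = n if n > 1 else 1
--     out = []
--     stack = [(length, m, False, "")]
--     while stack:
--         k, j, ban, prefix = stack.pop()
--         if j < 0 or 2 * j > k + (0 if ban else 1):
--             continue  # infeasible: not enough room for j non-adjacent stars
--         if k == 0:
--             out.append(prefix)
--             continue
--         # push dot branch first so the star branch is explored first (LIFO)
--         stack.append((k - 1, j, False, prefix + "."))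
--         if not ban:
--             stack.append((k - 1, j - 1, True, prefix + "*"))
--     return out
-- ===== Notes on version B (the rewrite author's own statement) =====
-- stated objective: faster
-- what changed: A grows all (length x star-count) buckets breadth-first, copying every partial arrangement at each of the n-1 rounds including dead-end partials that can never reach m stars; B is a depth-first backtracking search over an explicit stack with a feasibility prune (2*j <= remaining slots + adjacency bonus), emitting exactly the feasible strings in the same order.
import Mathlib
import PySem

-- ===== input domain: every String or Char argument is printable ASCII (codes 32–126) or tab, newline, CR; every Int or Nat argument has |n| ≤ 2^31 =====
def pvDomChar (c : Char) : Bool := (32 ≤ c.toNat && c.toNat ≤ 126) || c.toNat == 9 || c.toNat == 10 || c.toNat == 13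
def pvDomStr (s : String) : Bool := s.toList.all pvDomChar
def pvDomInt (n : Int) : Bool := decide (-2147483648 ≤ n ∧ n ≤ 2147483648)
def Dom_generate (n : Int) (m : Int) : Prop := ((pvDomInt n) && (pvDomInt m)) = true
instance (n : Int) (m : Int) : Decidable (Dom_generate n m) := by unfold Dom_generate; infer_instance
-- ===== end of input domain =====

-- B replaces A's breadth-first DP over (length × star-count) buckets by a depth-first
-- backtracking search with feasibility pruning that emits the same strings in the same order.

-- Python string concatenation a + b, exact: the characters of a followed by those of b.
def pvStrCat (a b : String) : String := String.ofList (a.toList ++ b.toList)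

-- ===== PORT A =====
-- body of "for row in current_arrangements[chip_count]: …"
def aRowStep (m cc : Int) (na : List (List String)) (row : String) : List (List String) :=
  let na1 := PySem.List.pySetD na cc (PySem.List.pyGetD na cc [] ++ [pvStrCat "." row])
  if cc < m ∧ PySem.Str.pyGet? row 0 ≠ some '*' then
    PySem.List.pySetD na1 (cc + 1) (PySem.List.pyGetD na1 (cc + 1) [] ++ [pvStrCat "*" row])
  else na1

-- body of "for chip_count in range(0, m + 1): …"
def aChipStep (m : Int) (ca na : List (List String)) (cc : Int) : List (List String) :=
  (PySem.List.pyGetD ca cc []).foldl (aRowStep m cc) na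

-- one iteration of "for _ in range(1, n): …" (builds next_arrangements from current_arrangements)
def aIter (m : Int) (ca : List (List String)) : List (List String) :=
  (PySem.List.pyRange 0 (m + 1) 1).foldl (aChipStep m ca)
    ((PySem.List.pyRange 0 (m + 1) 1).map (fun _ => ([] : List String)))

def generate (n : Int) (m : Int) : List String :=
  let ca0 := (PySem.List.pyRange 0 (m + 1) 1).map (fun _ => ([] : List String))
  let ca1 := PySem.List.pySetD ca0 0 ["."]
  let ca2 := PySem.List.pySetD ca1 1 ["*"]
  PySem.List.pyGetD ((PySem.List.pyRange 1 n 1).foldl (fun ca _ => aIter m ca) ca2) (-1) []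

-- ===== PORT B =====
-- The explicit DFS stack of Source B; top of the Python list = head of this list.
-- State (k, j, ban, prefix): k slots left, j stars still to place, ban = previous char was '*'.
def stackLoopB : List (Int × Int × Bool × String) → List String → List String
  | [], out => out
  | (k, j, ban, p) :: rest, out =>
    if j < 0 ∨ 2 * j > k + (if ban then 0 else 1) then
      stackLoopB rest out
    else if k = 0 then
      stackLoopB rest (out ++ [p])
    else
      -- push the dot branch first, then (if allowed) the star branch on top (LIFO)
      stackLoopB
        (if ban then (k - 1, j, false, pvStrCat p ".") :: rest
         else (k - 1, j - 1, true, pvStrCat p "*") :: (k - 1, j, false, pvStrCat p ".") :: rest)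
        out
termination_by st _ => (st.map (fun e => 3 ^ (e.1 + 2).toNat)).sum
decreasing_by
  · have h1 : 1 ≤ 3 ^ (k + 2).toNat := Nat.one_le_pow _ _ (by norm_num)
    simp only [List.map_cons, List.sum_cons]; omega
  · have h1 : 1 ≤ 3 ^ (k + 2).toNat := Nat.one_le_pow _ _ (by norm_num)
    simp only [List.map_cons, List.sum_cons]; omega
  · -- not pruned and k ≠ 0 force -1 ≤ k, so (k+2).toNat = (k+1).toNat + 1
    rename_i hprune hk0
    have hk : -1 ≤ k := by
      rcases not_or.mp hprune with ⟨hj, h2⟩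
      by_cases hb : ban <;> simp [hb] at h2 <;> omega
    have hpow : 2 * 3 ^ (k + 1).toNat < 3 ^ (k + 2).toNat := by
      have he : (k + 2).toNat = (k + 1).toNat + 1 := by omega
      have h1 : 1 ≤ 3 ^ (k + 1).toNat := Nat.one_le_pow _ _ (by norm_num)
      rw [he, pow_succ]; omega
    by_cases hb : ban <;> simp [hb, show k - 1 + 2 = k + 1 from by ring] <;> omega

def generate_alt (n : Int) (m : Int) : List String :=
  let length := if n > 1 then n else 1
  stackLoopB [(length, m, false, "")] []

-- ===== PRECONDITION & SPEC =====
-- Pre_ excludes exactly m ≤ 0: there A's seed "current_arrangements[1] = [\"*\"]" raises IndexError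
-- (the bucket list has length m+1 ≤ 1).
def Pre_generate (n : Int) (m : Int) : Prop := 1 ≤ m
instance (n : Int) (m : Int) : Decidable (Pre_generate n m) := by unfold Pre_generate; infer_instance

def pvWitness_generate : Int × Int := (4, 2)

def Spec_generate (n : Int) (m : Int) (out : List String) : Prop := out = generate_alt n m
instance (n : Int) (m : Int) (out : List String) : Decidable (Spec_generate n m out) := by unfold Spec_generate; infer_instance

-- ===== CLAIM (what is proved, stated in full; the proofs are below) =====
def Claim_equal_generate : Prop := ∀ (n : Int) (m : Int), Dom_generate n m → Pre_generate n m → Spec_generate n m (generate n m)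

-- ===== LEMMAS AND PROOFS =====

-- Specification-side generators, over List Char.
-- SGen k j ban: the suffixes B's DFS emits from state (k, j, ban), in emission order.
def SGen : Nat → Int → Bool → List (List Char)
  | 0, j, _ => if j = 0 then [[]] else []
  | (k + 1), j, ban =>
      (if ban then [] else (SGen k (j - 1) true).map (fun l => '*' :: l))
      ++ (SGen k j false).map (fun l => '.' :: l)

-- PGen k j: A's bucket of length-k arrangements with j stars, in A's order.
def PGen : Nat → Int → List (List Char)
  | 0, j => if j = 0 then [[]] else []
  | (k + 1), j =>
      ((PGen k (j - 1)).filter (fun l => !(PySem.Chars.pyGet? l 0 == some '*'))).map (fun l => '*' :: l)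
      ++ (PGen k j).map (fun l => '.' :: l)

lemma PGen_neg : ∀ (k : Nat) (j : Int), j < 0 → PGen k j = [] := by
  intro k
  induction k with
  | zero => intro j hj; rw [PGen, if_neg (by omega)]
  | succ k ih => intro j hj; rw [PGen, ih (j - 1) (by omega), ih j hj]; simp

lemma SGen_nil_of_infeasible : ∀ (k : Nat) (j : Int) (ban : Bool),
    (j < 0 ∨ 2 * j > (k : Int) + (if ban then 0 else 1)) → SGen k j ban = [] := by
  intro k
  induction k with
  | zero =>
    intro j ban h
    have : j ≠ 0 := by rcases h with h | h <;> cases ban <;> simp_all <;> omega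
    simp [SGen, this]
  | succ k ih =>
    intro j ban h
    cases ban
    · simp at h
      have hstar : SGen k (j - 1) true = [] := by apply ih; simp; omega
      have hdot : SGen k j false = [] := by apply ih; simp; omega
      simp [SGen, hstar, hdot]
    · simp at h
      have hdot : SGen k j false = [] := by apply ih; simp; omega
      simp [SGen, hdot]

-- PGen is SGen without pruning flag: the "does not start with '*'" filter IS the ban flag.
lemma pyGet0_cons (c : Char) (l : List Char) : PySem.Chars.pyGet? (c :: l) 0 = some c := by
  simp [PySem.Chars.pyGet?, PySem.List.pyGet?, PySem.List.pyIdx?]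

lemma PGen_eq_SGen : ∀ (k : Nat) (j : Int),
    PGen k j = SGen k j false ∧
    (PGen k j).filter (fun l => !(PySem.Chars.pyGet? l 0 == some '*')) = SGen k j true := by
  intro k
  induction k with
  | zero =>
    intro j
    refine ⟨rfl, ?_⟩
    by_cases hj : j = 0 <;>
      simp [PGen, SGen, hj, PySem.Chars.pyGet?, PySem.List.pyGet?, PySem.List.pyIdx?]
  | succ k ih =>
    intro j
    constructor
    · rw [PGen, SGen, (ih (j - 1)).2, (ih j).1]
      simp
    · rw [PGen, SGen]
      rw [List.filter_append, List.filter_map, List.filter_map]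
      have hstar : ((PGen k (j - 1)).filter (fun l => !(PySem.Chars.pyGet? l 0 == some '*'))).filter
          ((fun l => !(PySem.Chars.pyGet? l 0 == some '*')) ∘ (fun l => '*' :: l)) = [] := by
        apply List.filter_eq_nil_iff.mpr
        intro x _
        simp [Function.comp, pyGet0_cons]
      have hdot : (PGen k j).filter ((fun l => !(PySem.Chars.pyGet? l 0 == some '*')) ∘ (fun l => '.' :: l))
          = PGen k j := by
        apply List.filter_eq_self.mpr
        intro x _
        simp [Function.comp, pyGet0_cons]
      rw [hstar, hdot, (ih j).1]
      simp

-- setting index i of a range-indexed table updates it pointwise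
lemma pySetD_map_range {α : Type} (N i : Int) (h : Int → α) (v : α)
    (h0 : 0 ≤ i) (h1 : i < N) :
    PySem.List.pySetD ((PySem.List.pyRange 0 N 1).map h) i v
      = (PySem.List.pyRange 0 N 1).map (fun j => if j = i then v else h j) := by
  rw [PySem.List.pySetD_of_nonneg _ _ h0]
  apply List.ext_getElem
  · simp
  · intro idx hA hB
    have hidx : (idx : Int) < N := by
      have := hA; simp [PySem.List.length_pyRange_one] at this; omega
    simp only [List.getElem_set, List.getElem_map, PySem.List.getElem_pyRange_one]
    split_ifs with e1 e2
    · rfl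
    · exfalso; apply e2; omega
    · exfalso; apply e1; omega
    · rfl

lemma pyGetD_map_range_last {α : Type} (m : Int) (hm : 0 ≤ m) (f : Int → α) (d : α) :
    PySem.List.pyGetD ((PySem.List.pyRange 0 (m + 1) 1).map f) (-1) d = f m := by
  rw [PySem.List.pyRange_one_succ_right hm, List.map_append]
  exact PySem.List.pyGetD_neg_one_append_singleton _ _ _

-- the two halves of a new bucket: star-extensions of bucket j-1, dot-extensions of bucket j
def sPart (g : Int → List String) (j : Int) : List String :=
  ((g (j - 1)).filter (fun r => !(PySem.Str.pyGet? r 0 == some '*'))).map (fun r => pvStrCat "*" r)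
def dPart (g : Int → List String) (j : Int) : List String :=
  (g j).map (fun r => pvStrCat "." r)

-- the inner "for row in current_arrangements[chip_count]" loop
lemma rowfold (m c : Int) (h0 : 0 ≤ c) (h1 : c ≤ m) :
    ∀ (rows : List String) (h : Int → List String),
    rows.foldl (aRowStep m c) ((PySem.List.pyRange 0 (m + 1) 1).map h)
    = (PySem.List.pyRange 0 (m + 1) 1).map (fun j =>
        if j = c then h c ++ rows.map (fun r => pvStrCat "." r)
        else if j = c + 1 ∧ c < m then
          h j ++ (rows.filter (fun r => !(PySem.Str.pyGet? r 0 == some '*'))).map (fun r => pvStrCat "*" r)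
        else h j) := by
  intro rows
  induction rows with
  | nil =>
    intro h
    simp only [List.foldl_nil, List.map_nil, List.filter_nil, List.append_nil]
    symm
    apply List.map_congr_left
    intro j _
    split_ifs with e1 e2 <;> first | rfl | rw [e1]
  | cons r rows ih =>
    intro h
    have hget : PySem.List.pyGetD ((PySem.List.pyRange 0 (m + 1) 1).map h) c [] = h c :=
      PySem.List.pyGetD_map_pyRange_of_nonneg h (m + 1) c [] h0 (by omega)
    have e1 : PySem.List.pySetD ((PySem.List.pyRange 0 (m + 1) 1).map h) c
        (PySem.List.pyGetD ((PySem.List.pyRange 0 (m + 1) 1).map h) c [] ++ [pvStrCat "." r])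
        = (PySem.List.pyRange 0 (m + 1) 1).map
            (fun j => if j = c then h c ++ [pvStrCat "." r] else h j) := by
      rw [hget]; exact pySetD_map_range (m + 1) c h _ h0 (by omega)
    by_cases hcond : c < m ∧ PySem.Str.pyGet? r 0 ≠ some '*'
    · have e2get : PySem.List.pyGetD ((PySem.List.pyRange 0 (m + 1) 1).map
          (fun j => if j = c then h c ++ [pvStrCat "." r] else h j)) (c + 1) []
          = h (c + 1) := by
        rw [PySem.List.pyGetD_map_pyRange_of_nonneg _ (m + 1) (c + 1) [] (by omega) (by omega)]
        rw [if_neg (by omega)]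
      have step : aRowStep m c ((PySem.List.pyRange 0 (m + 1) 1).map h) r
          = (PySem.List.pyRange 0 (m + 1) 1).map
              (fun j => if j = c + 1 then h (c + 1) ++ [pvStrCat "*" r]
                else if j = c then h c ++ [pvStrCat "." r] else h j) := by
        rw [aRowStep]
        simp only [e1, if_pos hcond, e2get]
        rw [pySetD_map_range (m + 1) (c + 1) _ _ (by omega) (by omega)]
      rw [List.foldl_cons, step, ih]
      apply List.map_congr_left
      intro j hj
      by_cases ejc : j = c
      · subst ejc
        simp [show ¬ (j : Int) = j + 1 from by omega, show ¬ (j = j + 1 ∧ j < m) from by omega]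
      · by_cases ejc1 : j = c + 1 ∧ c < m
        · obtain ⟨e1', hcm⟩ := ejc1
          subst e1'
          have h2 : ¬ PySem.List.pyGet? r.toList 0 = some '*' := by
            have := hcond.2
            simpa [PySem.Str.pyGet?, PySem.Chars.pyGet?] using this
          simp [show ¬ (c + 1 : Int) = c from by omega, hcm, List.filter_cons, h2]
        · have hj1 : ¬ j = c + 1 := fun e => ejc1 ⟨e, hcond.1⟩
          simp [ejc, hj1, ejc1]
    · have step : aRowStep m c ((PySem.List.pyRange 0 (m + 1) 1).map h) r
          = (PySem.List.pyRange 0 (m + 1) 1).map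
              (fun j => if j = c then h c ++ [pvStrCat "." r] else h j) := by
        rw [aRowStep]
        simp only [e1, if_neg hcond]
      rw [List.foldl_cons, step, ih]
      apply List.map_congr_left
      intro j hj
      by_cases ejc : j = c
      · subst ejc
        simp [show ¬ (j : Int) = j + 1 from by omega, show ¬ (j = j + 1 ∧ j < m) from by omega]
      · by_cases ejc1 : j = c + 1 ∧ c < m
        · obtain ⟨e1', hcm⟩ := ejc1
          subst e1'
          have h2 : PySem.List.pyGet? r.toList 0 = some '*' := by
            have hstar : PySem.Str.pyGet? r 0 = some '*' := by
              by_contra hne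
              exact hcond ⟨hcm, hne⟩
            simpa [PySem.Str.pyGet?, PySem.Chars.pyGet?] using hstar
          simp [show ¬ (c + 1 : Int) = c from by omega, hcm, List.filter_cons, h2]
        · simp [ejc, ejc1]

-- the "for chip_count in range(0, m+1)" loop
lemma chipfold_aux (m : Int) (g : Int → List String) (hneg : ∀ j, j < 0 → g j = []) :
    ∀ (c : Nat), (c : Int) ≤ m + 1 →
    (PySem.List.pyRange 0 (c : Int) 1).foldl
        (aChipStep m ((PySem.List.pyRange 0 (m + 1) 1).map g))
        ((PySem.List.pyRange 0 (m + 1) 1).map (fun _ => ([] : List String)))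
    = (PySem.List.pyRange 0 (m + 1) 1).map (fun j =>
        if j < (c : Int) then sPart g j ++ dPart g j
        else if j = (c : Int) then sPart g j else []) := by
  intro c
  induction c with
  | zero =>
    intro _
    rw [PySem.List.pyRange_one_eq_nil (a := 0) (b := ((0 : Nat) : Int)) (by omega), List.foldl_nil]
    apply List.map_congr_left
    intro j hj
    have hjr := PySem.List.mem_pyRange_one.mp hj
    rw [if_neg (by omega)]
    by_cases ej : j = (0 : Int)
    · rw [if_pos (by exact_mod_cast ej)]
      simp [sPart, ej, hneg (-1) (by omega)]
    · rw [if_neg (by exact_mod_cast ej)]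
  | succ c ihc =>
    intro hc
    have hc' : (c : Int) ≤ m := by push_cast at hc ⊢; omega
    rw [show (((c : Nat) + 1 : Nat) : Int) = (c : Int) + 1 from by push_cast; ring,
        PySem.List.pyRange_one_succ_right (a := 0) (b := (c : Int)) (by omega),
        List.foldl_append, ihc (by omega)]
    simp only [List.foldl_cons, List.foldl_nil]
    rw [aChipStep,
        PySem.List.pyGetD_map_pyRange_of_nonneg g (m + 1) (c : Int) [] (by omega) (by omega),
        rowfold m (c : Int) (by omega) hc']
    apply List.map_congr_left
    intro j hj
    have hjr := PySem.List.mem_pyRange_one.mp hj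
    by_cases ejc : j = (c : Int)
    · rw [if_pos ejc, ejc,
          if_neg (show ¬ ((c : Int)) < (c : Int) from by omega), if_pos rfl,
          if_pos (show ((c : Int)) < (c : Int) + 1 from by omega)]
      rfl
    · by_cases ejlt : j < (c : Int)
      · rw [if_neg ejc, if_neg (by omega : ¬ (j = (c : Int) + 1 ∧ (c : Int) < m)),
            if_pos ejlt, if_pos (by omega)]
      · by_cases ejc1 : j = (c : Int) + 1
        · have hcm : (c : Int) < m := by omega
          subst ejc1
          rw [if_neg ejc, if_pos ⟨rfl, hcm⟩, if_neg (by omega), if_neg (by omega),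
              if_neg (by omega : ¬ (c : Int) + 1 < (c : Int) + 1), if_pos rfl]
          simp [sPart]
        · rw [if_neg ejc, if_neg (by simp [ejc1]), if_neg (by omega), if_neg (by omega),
              if_neg (by omega : ¬ j < (c : Int) + 1), if_neg ejc1]

lemma chipfold (m : Int) (hm : 0 ≤ m) (g : Int → List String) (hneg : ∀ j, j < 0 → g j = []) :
    aIter m ((PySem.List.pyRange 0 (m + 1) 1).map g)
    = (PySem.List.pyRange 0 (m + 1) 1).map (fun j => sPart g j ++ dPart g j) := by
  have hcast : (((m + 1).toNat : Nat) : Int) = m + 1 := by omega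
  have h := chipfold_aux m g hneg (m + 1).toNat (by omega)
  rw [hcast] at h
  rw [aIter, h]
  apply List.map_congr_left
  intro j hj
  have hjr := PySem.List.mem_pyRange_one.mp hj
  rw [if_pos (by omega)]

-- transport of the bucket recursion through String.ofList
lemma sPart_ofList (t : Nat) (j : Int) :
    sPart (fun j => (PGen t j).map String.ofList) j
      = (((PGen t (j - 1)).filter (fun l => !(PySem.Chars.pyGet? l 0 == some '*'))).map
          (fun l => '*' :: l)).map String.ofList := by
  rw [sPart, List.filter_map]
  have hp : ((fun r => !(PySem.Str.pyGet? r 0 == some '*')) ∘ (String.ofList : List Char → String))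
      = fun l => !(PySem.Chars.pyGet? l 0 == some '*') := by
    funext l
    simp [PySem.Str.pyGet?]
  rw [hp, List.map_map, List.map_map]
  apply List.map_congr_left
  intro l _
  show pvStrCat "*" (String.ofList l) = String.ofList ('*' :: l)
  simp [pvStrCat]

lemma dPart_ofList (t : Nat) (j : Int) :
    dPart (fun j => (PGen t j).map String.ofList) j
      = ((PGen t j).map (fun l => '.' :: l)).map String.ofList := by
  rw [dPart, List.map_map, List.map_map]
  apply List.map_congr_left
  intro l _
  show pvStrCat "." (String.ofList l) = String.ofList ('.' :: l)
  simp [pvStrCat]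

lemma aIter_PGen (m : Int) (hm : 0 ≤ m) (t : Nat) :
    aIter m ((PySem.List.pyRange 0 (m + 1) 1).map (fun j => (PGen t j).map String.ofList))
    = (PySem.List.pyRange 0 (m + 1) 1).map (fun j => (PGen (t + 1) j).map String.ofList) := by
  rw [chipfold m hm _ (fun j hj => by rw [PGen_neg t j hj]; rfl)]
  apply List.map_congr_left
  intro j _
  rw [sPart_ofList, dPart_ofList, PGen, List.map_append]

-- A's seed is the t = 1 bucket table
lemma PGen_one (j : Int) :
    PGen 1 j = if j = 0 then [['.']] else if j = 1 then [['*']] else [] := by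
  rw [show (1 : Nat) = 0 + 1 from rfl, PGen]
  by_cases e0 : j = 0
  · subst e0
    simp [PGen, show ¬ (0 : Int) - 1 = 0 from by omega]
  · by_cases e1 : j = 1
    · subst e1
      simp [PGen, PySem.Chars.pyGet?, PySem.List.pyGet?, PySem.List.pyIdx?, e0]
    · simp [PGen, e0, e1, show ¬ j - 1 = 0 from by omega]

lemma seed_eq (m : Int) (hm : 1 ≤ m) :
    PySem.List.pySetD
      (PySem.List.pySetD ((PySem.List.pyRange 0 (m + 1) 1).map (fun _ => ([] : List String))) 0 ["."])
      1 ["*"]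
    = (PySem.List.pyRange 0 (m + 1) 1).map (fun j => (PGen 1 j).map String.ofList) := by
  rw [pySetD_map_range (m + 1) 0 _ _ (by omega) (by omega),
      pySetD_map_range (m + 1) 1 _ _ (by omega) (by omega)]
  apply List.map_congr_left
  intro j _
  rw [PGen_one]
  by_cases e1 : j = 1
  · subst e1
    rw [if_pos rfl, if_neg (by omega), if_pos rfl]
    rfl
  · rw [if_neg e1]
    by_cases e0 : j = 0
    · subst e0
      rw [if_pos rfl, if_pos rfl]
      rfl
    · rw [if_neg e0, if_neg e0, if_neg e1]
      rfl

-- A's state after t iterations: bucket j holds PGen (t+1) j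
lemma generate_eq_PGen (n m : Int) (hm : 1 ≤ m) :
    generate n m = (PGen (1 + (n - 1).toNat) m).map String.ofList := by
  have outer : ∀ t : Nat,
      (PySem.List.pyRange 1 (1 + (t : Int)) 1).foldl (fun ca _ => aIter m ca)
        (PySem.List.pySetD
          (PySem.List.pySetD ((PySem.List.pyRange 0 (m + 1) 1).map (fun _ => ([] : List String))) 0 ["."])
          1 ["*"])
      = (PySem.List.pyRange 0 (m + 1) 1).map (fun j => (PGen (1 + t) j).map String.ofList) := by
    intro t
    induction t with
    | zero =>
      have h0 : PySem.List.pyRange 1 (1 + ((0 : Nat) : Int)) 1 = [] := by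
        apply PySem.List.pyRange_one_eq_nil
        omega
      rw [h0, List.foldl_nil]
      exact seed_eq m hm
    | succ t iht =>
      rw [show (1 + ((t : Nat) + 1 : Nat) : Int) = (1 + (t : Int)) + 1 from by push_cast; ring,
          PySem.List.pyRange_one_succ_right (a := 1) (b := 1 + (t : Int)) (by omega),
          List.foldl_append, iht]
      simp only [List.foldl_cons, List.foldl_nil]
      rw [aIter_PGen m (by omega) (1 + t)]
      rfl
  rw [generate]
  by_cases hn : n ≤ 1
  · rw [PySem.List.pyRange_one_eq_nil (a := 1) (b := n) (by omega), List.foldl_nil, seed_eq m hm,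
        pyGetD_map_range_last m (by omega)]
    rw [show (1 + (n - 1).toNat) = 1 from by omega]
  · rw [show PySem.List.pyRange 1 n 1 = PySem.List.pyRange 1 (1 + (((n - 1).toNat : Nat) : Int)) 1 from by
          congr 1; omega,
        outer (n - 1).toNat, pyGetD_map_range_last m (by omega)]

def genOf (e : Int × Int × Bool × String) : List String :=
  (SGen e.1.toNat e.2.1 e.2.2.1).map (fun suf => pvStrCat e.2.2.2 (String.ofList suf))

lemma stack_inv : ∀ (st : List (Int × Int × Bool × String)) (out : List String),
    (∀ e ∈ st, 0 ≤ e.1) → stackLoopB st out = out ++ (st.map genOf).flatten := by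
  intro st out
  induction st, out using stackLoopB.induct with
  | case1 out =>
    intro _
    simp [stackLoopB]
  | case2 k j ban p rest out hprune ih =>
    intro hgood
    have hk0 : (0 : Int) ≤ k := hgood _ (List.mem_cons_self ..)
    have hnil : SGen k.toNat j ban = [] := by
      apply SGen_nil_of_infeasible
      rcases hprune with h | h
      · exact Or.inl h
      · right
        cases ban <;> simp at h ⊢ <;> omega
    have hprune' : j < 0 ∨ 2 * j > k + if ban = true then 0 else 1 := by
      cases ban <;> simpa using hprune
    rw [stackLoopB]
    rw [if_pos hprune', ih (fun e he => hgood e (List.mem_cons_of_mem _ he))]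
    simp [genOf, hnil]
  | case3 j ban p rest out hprune ih =>
    intro hgood
    have hj : j = 0 := by
      have h := not_or.mp hprune
      cases ban <;> simp at h <;> omega
    have hprune' : ¬ (j < 0 ∨ 2 * j > 0 + if ban = true then 0 else 1) := by
      cases ban <;> simpa using hprune
    rw [stackLoopB]
    rw [if_neg hprune', if_pos rfl,
        ih (fun e he => hgood e (List.mem_cons_of_mem _ he))]
    have hp : genOf ((0 : Int), j, ban, p) = [p] := by
      subst hj
      cases ban <;> simp [genOf, SGen, pvStrCat]
    simp [hp]
  | case4 k j ban p rest out hprune hkne ih =>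
    intro hgood
    have hk0 : (0 : Int) ≤ k := hgood _ (List.mem_cons_self ..)
    have he : k.toNat = (k - 1).toNat + 1 := by omega
    have hgood' : ∀ e ∈ (if ban then ((k - 1, j, false, pvStrCat p ".") :: rest)
        else ((k - 1, j - 1, true, pvStrCat p "*") :: (k - 1, j, false, pvStrCat p ".") :: rest)),
        (0 : Int) ≤ e.1 := by
      intro e he'
      cases ban
      · simp at he'
        rcases he' with rfl | rfl | he'
        · omega
        · omega
        · exact hgood e (List.mem_cons_of_mem _ he')
      · simp at he'
        rcases he' with rfl | he'
        · omega
        · exact hgood e (List.mem_cons_of_mem _ he')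
    have hprune' : ¬ (j < 0 ∨ 2 * j > k + if ban = true then 0 else 1) := by
      cases ban <;> simpa using hprune
    rw [stackLoopB]
    simp only [if_neg hprune', if_neg hkne]
    have hstar : ∀ l : List Char,
        pvStrCat p (String.ofList ('*' :: l)) = pvStrCat (pvStrCat p "*") (String.ofList l) := by
      intro l
      simp [pvStrCat]
    have hdot : ∀ l : List Char,
        pvStrCat p (String.ofList ('.' :: l)) = pvStrCat (pvStrCat p ".") (String.ofList l) := by
      intro l
      simp [pvStrCat]
    cases ban
    · simp only [if_neg (by simp : ¬ (false = true))] at hgood'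
      rw [if_neg (by simp : ¬ (false = true))]
      have hrec : stackLoopB
            ((k - 1, j - 1, true, pvStrCat p "*") :: (k - 1, j, false, pvStrCat p ".") :: rest) out
          = out ++ (List.map genOf
              ((k - 1, j - 1, true, pvStrCat p "*") :: (k - 1, j, false, pvStrCat p ".") :: rest)).flatten :=
        ih hgood'
      rw [hrec]
      simp only [List.map_cons, List.flatten_cons]
      have hg : genOf (k, j, false, p)
          = genOf (k - 1, j - 1, true, pvStrCat p "*") ++ genOf (k - 1, j, false, pvStrCat p ".") := by
        show (SGen k.toNat j false).map (fun suf => pvStrCat p (String.ofList suf))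
            = (SGen (k - 1).toNat (j - 1) true).map
                (fun suf => pvStrCat (pvStrCat p "*") (String.ofList suf))
              ++ (SGen (k - 1).toNat j false).map
                (fun suf => pvStrCat (pvStrCat p ".") (String.ofList suf))
        rw [he, SGen, if_neg (by simp : ¬ (false = true)),
            List.map_append, List.map_map, List.map_map]
        congr 1
        · apply List.map_congr_left
          intro l _
          simp only [Function.comp_apply]
          exact hstar l
        · apply List.map_congr_left
          intro l _
          simp only [Function.comp_apply]
          exact hdot l
      rw [hg]
      simp
    · simp only [if_pos rfl] at hgood'
      rw [if_pos rfl]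
      have hrec : stackLoopB ((k - 1, j, false, pvStrCat p ".") :: rest) out
          = out ++ (List.map genOf ((k - 1, j, false, pvStrCat p ".") :: rest)).flatten :=
        ih hgood'
      rw [hrec]
      simp only [List.map_cons, List.flatten_cons]
      have hg : genOf (k, j, true, p) = genOf (k - 1, j, false, pvStrCat p ".") := by
        show (SGen k.toNat j true).map (fun suf => pvStrCat p (String.ofList suf))
            = (SGen (k - 1).toNat j false).map
                (fun suf => pvStrCat (pvStrCat p ".") (String.ofList suf))
        rw [he, SGen, if_pos rfl, List.nil_append, List.map_map]
        apply List.map_congr_left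
        intro l _
        simp only [Function.comp_apply]
        exact hdot l
      rw [hg]

lemma generate_alt_eq_SGen (n m : Int) :
    generate_alt n m = (SGen (if n > 1 then n else 1).toNat m false).map String.ofList := by
  have hlen : 0 ≤ (if n > 1 then n else 1) := by split_ifs <;> omega
  rw [generate_alt]
  rw [stack_inv [((if n > 1 then n else 1), m, false, "")] []
      (by intro e he; simp at he; subst he; exact hlen)]
  simp only [List.map_cons, List.map_nil, List.flatten_cons, List.flatten_nil,
             List.nil_append, List.append_nil]
  rw [genOf]
  apply List.map_congr_left
  intro l _
  show pvStrCat "" (String.ofList l) = String.ofList l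
  simp [pvStrCat]

-- ===== VERDICT (by name: the statement is the Claim_ definition above) =====
theorem generate_spec : Claim_equal_generate := by
  intro n m _ hm
  unfold Spec_generate
  rw [generate_eq_PGen n m hm, generate_alt_eq_SGen, (PGen_eq_SGen _ m).1]
  have h : (1 + (n - 1).toNat) = (if n > 1 then n else 1).toNat := by split_ifs <;> omega
  rw [h]
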